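-- pv_equiv track=rewrite | github.com/cinun/Voice-Assitant- | spotify.py | changeWord
-- ===== SOURCE A (Python) =====
-- def changeWord(initWord):
--     punctuations = ' !@#$%^&*()_-+=~`[]{};\':",.<>/?\|'
--     changed = ""
--     for every_char in initWord:
--         if every_char not in punctuations:
--             changed += every_char
--         elif every_char =='(':
--             return changed
--     return changed
-- ===== SOURCE B (Python) =====
-- def changeWord(initWord):
--     punctuations = ' !@#$%^&*()_-+=~`[]{};\':",.<>/?\|'
--     idx = initWord.find('(')
--     core = initWord if idx < 0 else initWord[:idx]
--     return ''.join(c for c in core if c not in punctuations)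
-- ===== Notes on version B (the rewrite author's own statement) =====
-- stated objective: alternative
-- what changed: A's single fused loop that interleaves filtering with an early return at '(' is split into two phases: first locate '(' and slice the prefix before it, then remove punctuation from that prefix in a separate filtering pass.
import Mathlib
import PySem

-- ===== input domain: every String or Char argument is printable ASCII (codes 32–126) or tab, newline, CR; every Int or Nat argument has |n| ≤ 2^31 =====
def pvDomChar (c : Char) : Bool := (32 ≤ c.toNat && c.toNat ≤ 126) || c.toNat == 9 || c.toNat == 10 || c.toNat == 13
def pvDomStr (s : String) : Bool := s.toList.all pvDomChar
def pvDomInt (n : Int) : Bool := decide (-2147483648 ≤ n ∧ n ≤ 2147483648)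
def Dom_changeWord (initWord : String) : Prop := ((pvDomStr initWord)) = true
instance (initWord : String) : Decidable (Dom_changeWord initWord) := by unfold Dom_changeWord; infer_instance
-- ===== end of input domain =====

-- B replaces A's single fused loop (filter + early return at '(') by two phases: take the prefix before the first '(', then filter punctuation out of it; same cost, different decomposition.

-- ===== PORT A =====
-- the punctuation string literal of A (the Python '\|' is a backslash followed by a pipe)
def pvPunct : List Char := " !@#$%^&*()_-+=~`[]{};':\",.<>/?\\|".toList

-- A's loop: accumulator 'changed', early return at '('
def changeWordGo (changed : List Char) : List Char → List Char
  | [] => changed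
  | c :: rest =>
    if ¬ pvPunct.contains c then changeWordGo (changed ++ [c]) rest
    else if c = '(' then changed
    else changeWordGo changed rest

def changeWord (initWord : String) : String :=
  String.ofList (changeWordGo [] initWord.toList)

-- ===== PORT B =====
def changeWord_alt (initWord : String) : String :=
  String.ofList (((initWord.toList.takeWhile (fun c => c != '(')).filter (fun c => !pvPunct.contains c)))

-- ===== PRECONDITION & SPEC =====
def Spec_changeWord (initWord : String) (out : String) : Prop := out = changeWord_alt initWord
instance (initWord : String) (out : String) : Decidable (Spec_changeWord initWord out) := by unfold Spec_changeWord; infer_instance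

-- ===== CLAIM (what is proved, stated in full; the proofs are below) =====
def Claim_equal_changeWord : Prop := ∀ (initWord : String), Dom_changeWord initWord → Spec_changeWord initWord (changeWord initWord)

-- ===== LEMMAS AND PROOFS =====
theorem changeWordGo_eq (l : List Char) : ∀ (acc : List Char),
    changeWordGo acc l = acc ++ (l.takeWhile (fun c => c != '(')).filter (fun c => !pvPunct.contains c) := by
  induction l with
  | nil => intro acc; simp [changeWordGo]
  | cons c rest ih =>
    intro acc
    by_cases hp : c ∈ pvPunct
    · by_cases hc : c = '('
      · subst hc
        simp [changeWordGo, hp, List.takeWhile]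
      · have hbne : (c != '(') = true := by simp [hc]
        simp [changeWordGo, hp, hc, List.takeWhile, hbne, List.filter, ih]
    · have hc : c ≠ '(' := by
        intro h; subst h; exact hp (by decide)
      have hbne : (c != '(') = true := by simp [hc]
      simp [changeWordGo, hp, List.takeWhile, hbne, List.filter, ih]

-- ===== VERDICT (by name: the statement is the Claim_ definition above) =====
theorem changeWord_spec : Claim_equal_changeWord := by
  intro s _
  unfold Spec_changeWord changeWord changeWord_alt
  rw [changeWordGo_eq]
  simp
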